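-- pv_equiv track=rewrite | github.com/Tarunashwini/NPTEL_PYTHON_ASSIGNMENT_CODES | Hill_Valley_WEEK3.py | counthv
-- ===== SOURCE A (Python) =====
-- def counthv(l):
--   a = []
--   for i in range(len(l)-1):
--     if l[i] < l[i+1]:
--       a.append("H")
--     else:
--       a.append("D")
--   he,dw = 0,0
--   for i in range(1,len(a)):
--     if a[i] == "D" and a[i-1] == "H":
--       he += 1
--     elif a[i] == "H" and a[i-1] == "D":
--       dw += 1
--   out = []
--   out.append(he)
--   out.append(dw)
--   return (out)
-- ===== SOURCE B (Python) =====
-- def counthv(l):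
--     he, dw = 0, 0
--     for x, y, z in zip(l, l[1:], l[2:]):
--         if x < y:
--             if y >= z:
--                 he += 1
--         else:
--             if y < z:
--                 dw += 1
--     return [he, dw]
-- ===== Notes on version B (the rewrite author's own statement) =====
-- stated objective: simpler
-- what changed: Drops the intermediate H/D token list and the second counting pass; a single pass over consecutive triples (zip of the list with its two shifts) counts peaks and valleys directly.
import Mathlib
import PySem

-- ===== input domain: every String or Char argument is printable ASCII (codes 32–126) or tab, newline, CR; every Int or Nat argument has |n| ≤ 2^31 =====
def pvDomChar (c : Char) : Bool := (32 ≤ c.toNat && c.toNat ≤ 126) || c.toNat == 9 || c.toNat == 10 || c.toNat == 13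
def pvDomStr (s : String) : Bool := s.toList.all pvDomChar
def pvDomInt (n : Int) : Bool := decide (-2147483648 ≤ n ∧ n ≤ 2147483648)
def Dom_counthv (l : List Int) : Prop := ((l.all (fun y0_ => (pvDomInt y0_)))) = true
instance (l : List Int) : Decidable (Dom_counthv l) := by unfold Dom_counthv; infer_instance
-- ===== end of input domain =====

-- B replaces A's two passes (build an H/D token list, then count adjacent HD/DH pairs)
-- by one direct pass over consecutive triples; objective: simpler.

-- ===== PORT A =====
def counthv (l : List Int) : List Int :=
  let a : List String := (PySem.List.pyRange 0 ((l.length : Int) - 1) 1).foldl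
    (fun a i => a ++ [if PySem.List.pyGetD l i 0 < PySem.List.pyGetD l (i + 1) 0 then "H" else "D"]) []
  let p : Int × Int := (PySem.List.pyRange 1 (a.length : Int) 1).foldl
    (fun p i =>
      if PySem.List.pyGetD a i "" == "D" && PySem.List.pyGetD a (i - 1) "" == "H" then (p.1 + 1, p.2)
      else if PySem.List.pyGetD a i "" == "H" && PySem.List.pyGetD a (i - 1) "" == "D" then (p.1, p.2 + 1)
      else p) (0, 0)
  [p.1, p.2]

-- ===== PORT B =====
-- one pass over the triples (x, y, z) = zip(l, l[1:], l[2:])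
def hvGo : List Int → Int × Int → Int × Int
  | x :: y :: z :: rest, p =>
      hvGo (y :: z :: rest)
        (if x < y then (if y ≥ z then (p.1 + 1, p.2) else p)
         else (if y < z then (p.1, p.2 + 1) else p))
  | _, p => p

def counthv_alt (l : List Int) : List Int :=
  let p := hvGo l (0, 0)
  [p.1, p.2]

-- ===== PRECONDITION & SPEC =====
def Spec_counthv (l : List Int) (out : List Int) : Prop := out = counthv_alt l
instance (l : List Int) (out : List Int) : Decidable (Spec_counthv l out) := by unfold Spec_counthv; infer_instance

-- ===== CLAIM (what is proved, stated in full; the proofs are below) =====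
def Claim_equal_counthv : Prop := ∀ (l : List Int), Dom_counthv l → Spec_counthv l (counthv l)

-- ===== LEMMAS AND PROOFS =====

-- the token A appends for a consecutive pair
def hvTok (x y : Int) : String := if x < y then "H" else "D"

-- A's second-loop step, on a (previous token, current token) pair
def hvStep (p : Int × Int) (q : String × String) : Int × Int :=
  if q.2 == "D" && q.1 == "H" then (p.1 + 1, p.2)
  else if q.2 == "H" && q.1 == "D" then (p.1, p.2 + 1)
  else p

-- indexed pairs (l[i], l[i+1]) for i in range(len(l)-1) are zip l l.tail
lemma pairs0_eq_zip (l : List Int) (d : Int) :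
    (PySem.List.pyRange 0 ((l.length : Int) - 1) 1).map
      (fun i => (PySem.List.pyGetD l i d, PySem.List.pyGetD l (i + 1) d)) = l.zip l.tail := by
  apply List.ext_getElem
  · simp [PySem.List.length_pyRange_one]
  · intro k h1 h2
    have hk : k < l.length - 1 := by
      simpa [PySem.List.length_pyRange_one] using h1
    have hk1 : k + 1 < l.length := by omega
    simp [PySem.List.getElem_pyRange_one]
    refine ⟨?_, ?_⟩
    · simp [List.getElem?_eq_getElem (by omega : k < l.length)]
    · rw [show (k : Int) + 1 = ((k + 1 : Nat) : Int) by push_cast; ring,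
        PySem.List.pyGetD_natCast, List.getD_eq_getElem?_getD,
        List.getElem?_eq_getElem hk1, Option.getD_some]

-- indexed pairs (a[i-1], a[i]) for i in range(1, len(a)) are zip a a.tail
lemma pairs1_eq_zip (a : List String) (d : String) :
    (PySem.List.pyRange 1 (a.length : Int) 1).map
      (fun i => (PySem.List.pyGetD a (i - 1) d, PySem.List.pyGetD a i d)) = a.zip a.tail := by
  apply List.ext_getElem
  · simp [PySem.List.length_pyRange_one]
  · intro k h1 h2
    have hk : k + 1 < a.length := by
      have := h1; simp [PySem.List.length_pyRange_one] at this; omega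
    simp [PySem.List.getElem_pyRange_one]
    refine ⟨?_, ?_⟩
    · simp [List.getElem?_eq_getElem (by omega : k < a.length)]
    · rw [show (1 : Int) + (k : Int) = ((k + 1 : Nat) : Int) by push_cast; ring,
        PySem.List.pyGetD_natCast, List.getD_eq_getElem?_getD,
        List.getElem?_eq_getElem hk, Option.getD_some]

-- A's token list is the map of hvTok over the consecutive pairs
lemma tokens_eq (l : List Int) :
    (PySem.List.pyRange 0 ((l.length : Int) - 1) 1).foldl
      (fun a i => a ++ [if PySem.List.pyGetD l i 0 < PySem.List.pyGetD l (i + 1) 0 then "H" else "D"]) []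
    = (l.zip l.tail).map (fun q => hvTok q.1 q.2) := by
  rw [PySem.List.foldl_append_singleton_eq_map
    (f := fun i => if PySem.List.pyGetD l i 0 < PySem.List.pyGetD l (i + 1) 0 then "H" else "D")
    (l := PySem.List.pyRange 0 ((l.length : Int) - 1) 1) (acc := ([] : List String))]
  rw [← pairs0_eq_zip l 0, List.map_map]
  rfl

-- A's counting loop over any list of tokens, as a fold over its adjacent pairs
lemma count_loop_eq (a : List String) (init : Int × Int) :
    (PySem.List.pyRange 1 (a.length : Int) 1).foldl
      (fun p i =>
        if PySem.List.pyGetD a i "" == "D" && PySem.List.pyGetD a (i - 1) "" == "H" then (p.1 + 1, p.2)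
        else if PySem.List.pyGetD a i "" == "H" && PySem.List.pyGetD a (i - 1) "" == "D" then (p.1, p.2 + 1)
        else p) init
    = (a.zip a.tail).foldl hvStep init := by
  rw [← pairs1_eq_zip a "", List.foldl_map]
  rfl

-- folding hvStep over adjacent token pairs is B's single pass over triples
lemma fold_tokens_eq_hvGo : ∀ (l : List Int) (p : Int × Int),
    (((l.zip l.tail).map (fun q => hvTok q.1 q.2)).zip
      ((l.zip l.tail).map (fun q => hvTok q.1 q.2)).tail).foldl hvStep p = hvGo l p := by
  intro l
  induction l with
  | nil => intro p; simp [hvGo]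
  | cons x t ih =>
    cases t with
    | nil => intro p; simp [hvGo]
    | cons y r =>
      cases r with
      | nil => intro p; simp [hvGo]
      | cons z r' =>
        intro p
        have hstep : hvStep p (hvTok x y, hvTok y z)
            = (if x < y then (if y ≥ z then (p.1 + 1, p.2) else p)
               else (if y < z then (p.1, p.2 + 1) else p)) := by
          by_cases hxy : x < y <;> by_cases hyz : y < z <;>
            simp [hvStep, hvTok, hxy, hyz, not_lt.mp]
        simp only [List.zip_cons_cons, List.map_cons, List.tail_cons, List.foldl_cons]
        rw [hstep]
        rw [show hvGo (x :: y :: z :: r') p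
            = hvGo (y :: z :: r')
                (if x < y then (if y ≥ z then (p.1 + 1, p.2) else p)
                 else (if y < z then (p.1, p.2 + 1) else p)) from rfl]
        exact ih _

-- ===== VERDICT (by name: the statement is the Claim_ definition above) =====
theorem counthv_spec : Claim_equal_counthv := by
  intro l _
  unfold Spec_counthv counthv counthv_alt
  simp only [tokens_eq, count_loop_eq]
  rw [fold_tokens_eq_hvGo]
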